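-- pv_equiv track=rewrite | github.com/andrewghaddad/OOP | OOP/Final_Review/q5.py | build_seen_and_unique
-- ===== SOURCE A (Python) =====
-- def find_index_of_min(l, used_indices):
--     #if all the indexes already visited or there are no element in the list then returns -1
--     if(len(l) == 0 or len(l) == len(used_indices)):
--         return -1
--     #defining a variable that stores the index that has not been visited yet.
--     minimumIndex = -1
--     #a minimum index is found or not is defined by this variable
--     found = 0
--     #this loop runs till it finds an index that is not in used_indices
--     while(found == 0):
--         minimumIndex += 1
--         if minimumIndex not in used_indices:
--             found = 1
--     #this loop finds minimum value index that has not been visited yet,i.e, not in used_indices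
--     for it in range(0, len(l)):
--         if it not in used_indices:
--             if(l[minimumIndex] > l[it]):
--                 minimumIndex = it
--     #we return the value of minimumIndex
--     return minimumIndex
--
-- def build_seen_and_unique(l):
--     #defining two list one for unique, another for storing visited index
--     unique = []
--     seen = []
--     #this loop runs for indexes between 0 to size of the list
--     for i in range(0,len(l)):
--         #we find the minimum index and append it to "seen" list
--         minIndex = find_index_of_min(l,seen)
--         seen.append(minIndex)
--         #if value of that index is not present in unique list, then we add it to te list
--         if l[minIndex] not in unique:
--             unique.append(l[minIndex])
--     #we return a tuple of unique and seen list
--     return (unique, seen)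
-- ===== SOURCE B (Python) =====
-- def build_seen_and_unique(l):
--     # sort (index, value) pairs by value; Python's sort is stable, so ties
--     # keep index order -- the same stable argsort A computes by repeated
--     # minimum scans.
--     pairs = sorted(enumerate(l), key=lambda p: p[1])
--     seen = [i for i, _ in pairs]
--     unique = []
--     for _, v in pairs:
--         if v not in unique:
--             unique.append(v)
--     return (unique, seen)
-- ===== Notes on version B (the rewrite author's own statement) =====
-- stated objective: faster
-- what changed: Replaces A's per-element full scan for the minimum unused index (selection sort) by one stable sort of (index, value) pairs, reading seen and unique off the sorted list.
import Mathlib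
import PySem

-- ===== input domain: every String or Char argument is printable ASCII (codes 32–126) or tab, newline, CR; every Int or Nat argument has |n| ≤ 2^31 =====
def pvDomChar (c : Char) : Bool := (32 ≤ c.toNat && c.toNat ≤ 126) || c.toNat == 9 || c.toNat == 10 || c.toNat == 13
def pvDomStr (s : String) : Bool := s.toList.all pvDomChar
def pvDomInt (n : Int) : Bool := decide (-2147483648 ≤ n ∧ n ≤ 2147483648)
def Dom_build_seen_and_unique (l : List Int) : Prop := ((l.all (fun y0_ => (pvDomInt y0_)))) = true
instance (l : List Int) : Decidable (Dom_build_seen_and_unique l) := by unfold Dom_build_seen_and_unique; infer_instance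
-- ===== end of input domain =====

-- B replaces A's O(n^2)-scan-per-element selection loop by one stable sort of
-- (index, value) pairs (objective: faster, O(n^2 * n) -> O(n^2) here / O(n log n) with Python's sort).

-- ===== PORT A =====
-- the `while(found == 0)` loop of find_index_of_min: first i ≥ start not in `used`;
-- fuel used.length+1 suffices (some value in 0..len(used) is missing), so this is exact.
def pvFirstFree (used : List Int) : Int → Nat → Int
  | i, 0 => i
  | i, fuel+1 => if i ∈ used then pvFirstFree used (i+1) fuel else i

-- l[m] is always in range at the sites A evaluates it, so pyGetD _ _ 0 is exact there
def find_index_of_min (l : List Int) (used : List Int) : Int :=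
  if l.length = 0 ∨ l.length = used.length then -1
  else
    let m0 := pvFirstFree used 0 (used.length + 1)
    (PySem.List.pyRange 0 l.length).foldl
      (fun m it =>
        if it ∉ used then
          (if PySem.List.pyGetD l m 0 > PySem.List.pyGetD l it 0 then it else m)
        else m) m0

def build_seen_and_unique (l : List Int) : List Int × List Int :=
  let st := (PySem.List.pyRange 0 l.length).foldl
    (fun (us : List Int × List Int) _ =>
      let m := find_index_of_min l us.2
      let s' := us.2 ++ [m]
      let v := PySem.List.pyGetD l m 0
      (if v ∈ us.1 then us.1 else us.1 ++ [v], s'))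
    ([], [])
  (st.1, st.2)

-- ===== PORT B =====
def build_seen_and_unique_alt (l : List Int) : List Int × List Int :=
  let pairs := PySem.List.sorted (PySem.List.enumerate l) (fun p => p.2) false
  let seen := pairs.map (fun p => p.1)
  let unique := pairs.foldl (fun u p => if p.2 ∈ u then u else u ++ [p.2]) []
  (unique, seen)

-- ===== PRECONDITION & SPEC =====
def Spec_build_seen_and_unique (l : List Int) (out : List Int × List Int) : Prop := out = build_seen_and_unique_alt l
instance (l : List Int) (out : List Int × List Int) : Decidable (Spec_build_seen_and_unique l out) := by unfold Spec_build_seen_and_unique; infer_instance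

-- ===== CLAIM (what is proved, stated in full; the proofs are below) =====
def Claim_equal_build_seen_and_unique : Prop := ∀ (l : List Int), Dom_build_seen_and_unique l → Spec_build_seen_and_unique l (build_seen_and_unique l)

-- ===== LEMMAS AND PROOFS =====

-- strict lexicographic order on (index, value) pairs by (value, index)
def pvLex (a b : Int × Int) : Prop := a.2 < b.2 ∨ (a.2 = b.2 ∧ a.1 < b.1)

-- the sorted pair list both programs are about
def pvSP (l : List Int) : List (Int × Int) :=
  PySem.List.sorted (PySem.List.enumerate l) (fun p => p.2) false

lemma pvInsertBy_pairwise (x : Int × Int) (acc : List (Int × Int))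
    (h : acc.Pairwise pvLex) (hidx : ∀ p ∈ acc, p.1 < x.1) :
    (PySem.List.insertBy (fun a b => decide (a.2 < b.2)) x acc).Pairwise pvLex := by
  induction acc with
  | nil => simp [PySem.List.insertBy]
  | cons y ys ih =>
    rw [List.pairwise_cons] at h
    obtain ⟨hy, hys⟩ := h
    have hyx : y.1 < x.1 := hidx y (by simp)
    have hidx' : ∀ p ∈ ys, p.1 < x.1 := fun p hp => hidx p (by simp [hp])
    show (PySem.List.insertBy _ x (y :: ys)).Pairwise pvLex
    rw [PySem.List.insertBy]
    by_cases hxy : x.2 < y.2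
    · simp only [hxy, decide_true, if_true]
      refine List.Pairwise.cons ?_ (List.Pairwise.cons hy hys)
      intro z hz
      rcases List.mem_cons.mp hz with rfl | hz'
      · exact Or.inl hxy
      · have := hy z hz'
        rcases this with h1 | ⟨h1, _⟩
        · exact Or.inl (lt_trans hxy h1)
        · exact Or.inl (h1 ▸ hxy)
    · simp only [hxy, decide_false]
      refine List.Pairwise.cons ?_ (ih hys hidx')
      intro z hz
      rcases (PySem.List.mem_insertBy _ _ _ _).mp hz with rfl | hz'
      · rcases lt_or_eq_of_le (not_lt.mp hxy) with h1 | h1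
        · exact Or.inl h1
        · exact Or.inr ⟨h1, hyx⟩
      · exact hy z hz' 

lemma pvFoldl_insert_pairwise : ∀ (xs : List Int) (s : Int) (acc : List (Int × Int)),
    acc.Pairwise pvLex → (∀ p ∈ acc, p.1 < s) →
    ((PySem.List.enumerate xs s).foldl
      (fun acc x => PySem.List.insertBy (fun a b => decide (a.2 < b.2)) x acc) acc).Pairwise pvLex := by
  intro xs
  induction xs with
  | nil => intro s acc h _; simpa [PySem.List.enumerate_nil] using h
  | cons v vs ih =>
    intro s acc h hidx
    rw [PySem.List.enumerate_cons, List.foldl_cons]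
    refine ih (s + 1) _ (pvInsertBy_pairwise (s, v) acc h hidx) ?_
    intro p hp
    rcases (PySem.List.mem_insertBy _ _ _ _).mp hp with rfl | hp'
    · simp
    · have := hidx p hp'; omega

lemma pvSP_pairwise (l : List Int) : (pvSP l).Pairwise pvLex := by
  rw [pvSP, PySem.List.sorted_eq_foldl_insertBy]
  exact pvFoldl_insert_pairwise l 0 [] List.Pairwise.nil (by simp)

lemma pvSP_perm (l : List Int) : (pvSP l).Perm (PySem.List.enumerate l) := by
  exact PySem.List.sorted_perm _ _ _

lemma pvSP_length (l : List Int) : (pvSP l).length = l.length := by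
  rw [(pvSP_perm l).length_eq, PySem.List.length_enumerate]

lemma pvSP_mem (l : List Int) (p : Int × Int) (hp : p ∈ pvSP l) :
    ∃ k : Nat, ∃ h : k < l.length, p = ((k : Int), l[k]) := by
  have := (pvSP_perm l).mem_iff.mp hp
  rw [PySem.List.mem_enumerate_iff] at this
  simpa using this

lemma pvSP_map_fst_perm (l : List Int) :
    ((pvSP l).map (fun p => p.1)).Perm (PySem.List.pyRange 0 l.length) := by
  have := ((pvSP_perm l).map (fun p => p.1))
  rwa [PySem.List.map_fst_enumerate, zero_add] at this

lemma pvSP_map_fst_nodup (l : List Int) : ((pvSP l).map (fun p => p.1)).Nodup := by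
  exact (pvSP_map_fst_perm l).nodup_iff.mpr (PySem.List.nodup_pyRange_one 0 l.length)

lemma pvFirstFree_spec (used : List Int) :
    ∀ (fuel : Nat) (i : Int), (∃ t : Nat, t < fuel ∧ (i + t) ∉ used) →
      pvFirstFree used i fuel ∉ used ∧ i ≤ pvFirstFree used i fuel ∧
      (∀ j : Int, i ≤ j → j ∉ used → pvFirstFree used i fuel ≤ j) := by
  intro fuel
  induction fuel with
  | zero => intro i ⟨t, ht, _⟩; omega
  | succ f ih =>
    intro i ⟨t, ht, hfree⟩
    by_cases hi : i ∈ used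
    · have ht0 : t ≠ 0 := by rintro rfl; simp at hfree; exact hfree hi
      have ih' := ih (i + 1) ⟨t - 1, by omega, by
        have : ((i + 1) + ((t - 1 : Nat) : Int)) = i + (t : Int) := by omega
        rw [this]; exact hfree⟩
      rw [pvFirstFree]; simp only [hi, if_true]
      refine ⟨ih'.1, by omega, fun j hj hjf => ?_⟩
      have : i ≠ j := by rintro rfl; exact hjf hi
      exact ih'.2.2 j (by omega) hjf
    · rw [pvFirstFree]; simp only [hi, if_false]
      exact ⟨not_false, le_rfl, fun j hj _ => hj⟩

lemma pvExists_free (s : List Int) : ∃ t : Nat, t ≤ s.length ∧ ((t : Int)) ∉ s := by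
  by_contra hcon
  push Not at hcon
  have hsub : ((List.range (s.length + 1)).map (fun t : Nat => (t : Int))) ⊆ s := by
    intro x hx
    simp only [List.mem_map, List.mem_range] at hx
    obtain ⟨t, ht, rfl⟩ := hx
    exact hcon t (by omega)
  have hnd : ((List.range (s.length + 1)).map (fun t : Nat => (t : Int))).Nodup := by
    exact (List.nodup_range).map (fun a b h => by exact_mod_cast h)
  have := (List.subperm_of_subset hnd hsub).length_le
  simp at this

-- find_index_of_min returns the (value, index)-lexicographic argmin over unused indices
lemma pvFim_spec (l : List Int) (s : List Int) (q : Int × Int)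
    (hslen : s.length < l.length)
    (hq1 : 0 ≤ q.1) (hq1' : q.1 < (l.length : Int))
    (hq2 : PySem.List.pyGetD l q.1 0 = q.2)
    (hqR : q.1 ∉ s)
    (hmin : ∀ i : Int, 0 ≤ i → i < (l.length : Int) → i ∉ s →
      (q.2 < PySem.List.pyGetD l i 0 ∨ (q.2 = PySem.List.pyGetD l i 0 ∧ q.1 ≤ i))) :
    find_index_of_min l s = q.1 := by
  obtain ⟨t, ht, htf⟩ := pvExists_free s
  have hm0 := pvFirstFree_spec s (s.length + 1) 0
    ⟨t, by omega, by simpa using htf⟩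
  set m0 := pvFirstFree s 0 (s.length + 1) with hm0def
  obtain ⟨hm0f, hm00, hm0min⟩ := hm0
  have hm0q : m0 ≤ q.1 := hm0min q.1 hq1 hqR
  have scan : ∀ j : Nat, j ≤ l.length →
      (fun m : Int =>
        (0 ≤ m ∧ m < (l.length : Int) ∧ m ∉ s) ∧ (m = m0 ∨ m < (j : Int)) ∧
        (∀ i : Int, 0 ≤ i → i < (j : Int) → i ∉ s →
          (PySem.List.pyGetD l m 0 < PySem.List.pyGetD l i 0 ∨
           (PySem.List.pyGetD l m 0 = PySem.List.pyGetD l i 0 ∧ m ≤ i))))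
      ((PySem.List.pyRange 0 (j : Int)).foldl
        (fun m it =>
          if it ∉ s then
            (if PySem.List.pyGetD l m 0 > PySem.List.pyGetD l it 0 then it else m)
          else m) m0) := by
    intro j
    induction j with
    | zero =>
      intro _
      rw [Nat.cast_zero, PySem.List.pyRange_one_eq_nil le_rfl, List.foldl_nil]
      exact ⟨⟨hm00, by omega, hm0f⟩, Or.inl rfl, by intro i _ h2 _; omega⟩
    | succ j ih =>
      intro hj1
      have hj : j ≤ l.length := by omega
      have hsplit : PySem.List.pyRange 0 ((j + 1 : Nat) : Int) =
          PySem.List.pyRange 0 (j : Int) ++ [(j : Int)] := by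
        push_cast
        exact PySem.List.pyRange_one_succ_right (by omega)
      rw [hsplit, List.foldl_append]
      obtain ⟨⟨hb0, hbn, hbs⟩, hdisj, hmn⟩ := ih hj
      set m := (PySem.List.pyRange 0 (j : Int)).foldl
        (fun m it =>
          if it ∉ s then
            (if PySem.List.pyGetD l m 0 > PySem.List.pyGetD l it 0 then it else m)
          else m) m0 with hmdef
      simp only [List.foldl_cons, List.foldl_nil]
      by_cases hjs : (j : Int) ∈ s
      · rw [if_neg (not_not_intro hjs)]
        refine ⟨⟨hb0, hbn, hbs⟩, by omega, ?_⟩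
        intro i hi1 hi2 hi3
        rcases lt_or_eq_of_le (show i ≤ (j : Int) by omega) with h | h
        · exact hmn i hi1 h hi3
        · exact absurd (h ▸ hjs) hi3
      · rw [if_pos hjs]
        by_cases hgt : PySem.List.pyGetD l m 0 > PySem.List.pyGetD l (j : Int) 0
        · rw [if_pos hgt]
          refine ⟨⟨by omega, by omega, hjs⟩, by omega, ?_⟩
          intro i hi1 hi2 hi3
          rcases lt_or_eq_of_le (show i ≤ (j : Int) by omega) with h | h
          · rcases hmn i hi1 h hi3 with h1 | ⟨h1, _⟩
            · exact Or.inl (lt_trans hgt h1)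
            · exact Or.inl (h1 ▸ hgt)
          · subst h; exact Or.inr ⟨rfl, le_rfl⟩
        · rw [if_neg hgt]
          refine ⟨⟨hb0, hbn, hbs⟩, by omega, ?_⟩
          intro i hi1 hi2 hi3
          rcases lt_or_eq_of_le (show i ≤ (j : Int) by omega) with h | h
          · exact hmn i hi1 h hi3
          · subst h
            rcases lt_or_eq_of_le (not_lt.mp hgt) with h1 | h1
            · exact Or.inl h1
            · refine Or.inr ⟨h1, ?_⟩
              rcases hdisj with h2 | h2
              · exact h2 ▸ hm0min _ hi1 hi3
              · omega
  have hfin := scan l.length le_rfl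
  simp only at hfin
  obtain ⟨⟨hb0, hbn, hbs⟩, _, hmn⟩ := hfin
  have h1 := hmn q.1 hq1 hq1' hqR
  have h2 := hmin _ hb0 hbn hbs
  rw [hq2] at h1
  unfold find_index_of_min
  rw [if_neg (by omega)]
  simp only [← hm0def]
  omega

lemma pvMain_loop (l : List Int) : ∀ (j : Nat), j ≤ l.length →
    (PySem.List.pyRange 0 (j : Int)).foldl
      (fun (us : List Int × List Int) _ =>
        let m := find_index_of_min l us.2
        let s' := us.2 ++ [m]
        let v := PySem.List.pyGetD l m 0
        (if v ∈ us.1 then us.1 else us.1 ++ [v], s'))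
      ([], [])
    = (((pvSP l).take j).foldl (fun u p => if p.2 ∈ u then u else u ++ [p.2]) [],
       ((pvSP l).take j).map (fun p => p.1)) := by
  intro j
  induction j with
  | zero =>
    intro _
    rw [Nat.cast_zero, PySem.List.pyRange_one_eq_nil le_rfl, List.foldl_nil]
    simp
  | succ j ih =>
    intro hj1
    have hj : j <= l.length := by omega
    have hjlt : j < l.length := by omega
    have hjsp : j < (pvSP l).length := by rw [pvSP_length]; exact hjlt
    have hsplit : PySem.List.pyRange 0 ((j + 1 : Nat) : Int) =
        PySem.List.pyRange 0 (j : Int) ++ [(j : Int)] := by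
      push_cast
      exact PySem.List.pyRange_one_succ_right (by omega)
    rw [hsplit, List.foldl_append, ih hj, List.foldl_cons, List.foldl_nil]
    set sp := pvSP l with hspdef
    set s := (sp.take j).map (fun p => p.1) with hsdef
    set q := sp[j] with hqdef
    have hqmem : q ∈ sp := List.getElem_mem hjsp
    obtain ⟨k, hk, hqeq⟩ := pvSP_mem l q hqmem
    have hq1 : 0 <= q.1 := by rw [hqeq]; exact Int.natCast_nonneg k
    have hq1' : q.1 < (l.length : Int) := by
      rw [hqeq]; show ((k : Nat) : Int) < _; exact_mod_cast hk
    have hq2 : PySem.List.pyGetD l q.1 0 = q.2 := by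
      rw [hqeq]
      show PySem.List.pyGetD l ((k : Nat) : Int) 0 = l[k]
      rw [PySem.List.pyGetD_natCast]
      exact List.getD_eq_getElem l 0 hk
    have hslen : s.length = j := by
      rw [hsdef, List.length_map, List.length_take]
      omega
    have hqR : q.1 ∉ s := by
      intro hmem
      rw [hsdef, List.map_take] at hmem
      obtain ⟨i, hi, hie⟩ := List.getElem_of_mem hmem
      have hilen : i < j := by
        have := hi; rw [List.length_take] at this; omega
      rw [List.getElem_take] at hie
      have hje : (sp.map (fun p => p.1))[j]'(by rw [List.length_map]; omega) = q.1 := by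
        rw [List.getElem_map]
      have := (pvSP_map_fst_nodup l).getElem_inj_iff.mp (hie.trans hje.symm)
      omega
    have hmin : ∀ i : Int, 0 <= i → i < (l.length : Int) → i ∉ s →
        (q.2 < PySem.List.pyGetD l i 0 ∨ (q.2 = PySem.List.pyGetD l i 0 ∧ q.1 <= i)) := by
      intro i hi0 hin his
      have hk' : i.toNat < l.length := by omega
      have hival : PySem.List.pyGetD l i 0 = l[i.toNat] := by
        have h := PySem.List.pyGetD_natCast l i.toNat (0 : Int)
        rw [show ((i.toNat : Nat) : Int) = i by omega] at h
        rw [h]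
        exact List.getD_eq_getElem l 0 hk'
      have hpmem : ((i, l[i.toNat]) : Int × Int) ∈ PySem.List.enumerate l 0 := by
        rw [PySem.List.mem_enumerate_iff]
        exact ⟨i.toNat, hk', by simp; omega⟩
      have hpsp : ((i, l[i.toNat]) : Int × Int) ∈ sp := (pvSP_perm l).mem_iff.mpr hpmem
      rw [← List.take_append_drop j sp] at hpsp
      rcases List.mem_append.mp hpsp with hpt | hpd
      · exact absurd (List.mem_map_of_mem hpt) his
      · rw [← List.getElem_cons_drop hjsp] at hpd
        rcases List.mem_cons.mp hpd with hpq | hpd'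
        · rw [hival, hqdef, ← hpq]
          exact Or.inr ⟨rfl, le_rfl⟩
        · have hdp : (sp.drop j).Pairwise pvLex :=
            List.Pairwise.sublist (List.drop_sublist _ _) (pvSP_pairwise l)
          rw [← List.getElem_cons_drop hjsp] at hdp
          have hlex := (List.pairwise_cons.mp hdp).1 _ hpd'
          rw [hival]
          rcases hlex with h | ⟨h1, h2⟩
          · exact Or.inl h
          · exact Or.inr ⟨h1, le_of_lt h2⟩
    have hfim : find_index_of_min l s = q.1 :=
      pvFim_spec l s q (by rw [hslen]; exact hjlt) hq1 hq1' hq2 hqR hmin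
    have htake : sp.take (j + 1) = sp.take j ++ [q] := by
      rw [List.take_add_one, List.getElem?_eq_getElem hjsp]
      rfl
    rw [htake, List.foldl_append, List.foldl_cons, List.foldl_nil, List.map_append]
    simp only [hfim, hq2, List.map_cons, List.map_nil]
    rw [hsdef]

-- ===== VERDICT (by name: the statement is the Claim_ definition above) =====
theorem build_seen_and_unique_spec : Claim_equal_build_seen_and_unique := by
  intro l _
  unfold Spec_build_seen_and_unique build_seen_and_unique build_seen_and_unique_alt
  have h := pvMain_loop l l.length le_rfl
  have h1 : (pvSP l).take l.length = pvSP l := List.take_of_length_le (pvSP_length l).le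
  rw [h1] at h
  simpa [pvSP] using h
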